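-- pv_equiv track=rewrite | github.com/HotHams/FutureSightML | showdown/teambuilder/constraints.py | _base_species
-- ===== SOURCE A (Python) =====
-- def _base_species(species_id: str) -> str:
--     """Normalize formes to base species for species clause.
--
--     e.g., 'rotomwash' -> 'rotom', 'charizardmegax' -> 'charizard'
--     """
--     # Common forme suffixes
--     for suffix in ["mega", "megax", "megay", "gmax", "alola", "galar",
--                    "hisui", "paldea", "origin", "therian", "wash",
--                    "heat", "frost", "fan", "mow", "sky", "attack",
--                    "defense", "speed", "sandy", "trash"]:
--         if species_id.endswith(suffix) and len(species_id) > len(suffix):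
--             return species_id[:-len(suffix)]
--     return species_id
-- ===== SOURCE B (Python) =====
-- # Forme suffixes indexed by length: loop over candidate lengths, slice once, set lookup.
-- _SUFFIXES_BY_LEN = {
--     7: {"therian", "defense"},
--     6: {"paldea", "origin", "attack"},
--     5: {"megax", "megay", "alola", "galar", "hisui", "frost", "speed", "sandy", "trash"},
--     4: {"mega", "gmax", "wash", "heat"},
--     3: {"fan", "mow", "sky"},
-- }
--
-- def _base_species(species_id: str) -> str:
--     n = len(species_id)
--     for L in (7, 6, 5, 4, 3):
--         if n > L and species_id[-L:] in _SUFFIXES_BY_LEN[L]: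
--             return species_id[:-L]
--     return species_id
-- ===== Notes on version B (the rewrite author's own statement) =====
-- stated objective: alternative
-- what changed: Replaces A's linear endswith-scan over all 21 suffixes with a precomputed length-to-suffix-set dict: B loops over the 5 candidate lengths, takes one slice per length and does a set lookup; correct because no suffix in the table is a suffix of another, so at most one suffix can ever match.
import Mathlib
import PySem

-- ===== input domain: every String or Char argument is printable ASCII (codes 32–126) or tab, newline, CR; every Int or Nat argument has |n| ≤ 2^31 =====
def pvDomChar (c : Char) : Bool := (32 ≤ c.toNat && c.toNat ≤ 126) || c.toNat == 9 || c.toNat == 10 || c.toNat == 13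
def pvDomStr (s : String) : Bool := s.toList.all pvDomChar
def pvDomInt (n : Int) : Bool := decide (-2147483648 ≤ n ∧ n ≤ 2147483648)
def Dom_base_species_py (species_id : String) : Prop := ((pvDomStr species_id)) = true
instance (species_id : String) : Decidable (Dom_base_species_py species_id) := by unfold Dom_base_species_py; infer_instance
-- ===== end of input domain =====

-- B indexes the forme suffixes by length and tests one slice per candidate length against a set,
-- instead of A's endswith-scan over every suffix; same return value everywhere (alternative/idiomatic).

-- ===== PORT A =====
def aSuffixes : List String :=
  ["mega", "megax", "megay", "gmax", "alola", "galar",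
   "hisui", "paldea", "origin", "therian", "wash",
   "heat", "frost", "fan", "mow", "sky", "attack",
   "defense", "speed", "sandy", "trash"]

def aLoop (species_id : String) : List String → String
  | [] => species_id
  | suffix :: rest =>
    if PySem.Str.endswith species_id suffix = true ∧
        PySem.Str.len species_id > PySem.Str.len suffix then
      PySem.Str.slice species_id none (some (-(PySem.Str.len suffix)))
    else aLoop species_id rest

def base_species_py (species_id : String) : String := aLoop species_id aSuffixes

-- ===== PORT B =====
def bSuffixesByLen : PySem.Dict Int (PySem.Set String) :=
  PySem.Dict.ofList
    [(7, PySem.Set.ofList ["therian", "defense"]),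
     (6, PySem.Set.ofList ["paldea", "origin", "attack"]),
     (5, PySem.Set.ofList ["megax", "megay", "alola", "galar", "hisui", "frost", "speed", "sandy", "trash"]),
     (4, PySem.Set.ofList ["mega", "gmax", "wash", "heat"]),
     (3, PySem.Set.ofList ["fan", "mow", "sky"])]

-- Python's `_SUFFIXES_BY_LEN[L]`: every L in the loop tuple is a key of the dict, so the
-- KeyError branch is dead code and `getD … Set.empty` is exact here.
def bLoop (species_id : String) (n : Int) : List Int → String
  | [] => species_id
  | L :: rest =>
    if n > L ∧ PySem.Set.contains (bSuffixesByLen.getD L PySem.Set.empty)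
        (PySem.Str.slice species_id (some (-L)) none) = true then
      PySem.Str.slice species_id none (some (-L))
    else bLoop species_id n rest

def base_species_py_alt (species_id : String) : String :=
  bLoop species_id (PySem.Str.len species_id) [7, 6, 5, 4, 3]

-- ===== PRECONDITION & SPEC =====
def Spec_base_species_py (species_id : String) (out : String) : Prop := out = base_species_py_alt species_id
instance (species_id : String) (out : String) : Decidable (Spec_base_species_py species_id out) := by unfold Spec_base_species_py; infer_instance

-- ===== CLAIM (what is proved, stated in full; the proofs are below) =====
def Claim_equal_base_species_py : Prop := ∀ (species_id : String), Dom_base_species_py species_id → Spec_base_species_py species_id (base_species_py species_id)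

-- ===== LEMMAS AND PROOFS =====

-- the per-suffix condition of A's loop, as a Bool predicate
def pMatch (s : String) (u : String) : Bool :=
  PySem.Str.endswith s u && decide (PySem.Str.len s > PySem.Str.len u)

-- what both loops do with the first matching suffix (continuation-passing form)
def onFound (s : String) (o : Option String) (cont : String) : String :=
  match o with
  | some u => PySem.Str.slice s none (some (-(PySem.Str.len u)))
  | none => cont

lemma onFound_or (s : String) (o1 o2 : Option String) (c : String) :
    onFound s (o1.or o2) c = onFound s o1 (onFound s o2 c) := by
  cases o1 <;> rfl

lemma pMatch_parts {s u : String} (h : pMatch s u = true) :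
    PySem.Str.endswith s u = true ∧ PySem.Str.len s > PySem.Str.len u := by
  simp only [pMatch, Bool.and_eq_true, decide_eq_true_eq] at h
  exact h

lemma pMatch_suffix {s u : String} (h : pMatch s u = true) : u.toList <:+ s.toList := by
  have := (pMatch_parts h).1
  rw [PySem.Str.endswith_eq] at this
  exact (PySem.Chars.endswith_iff _ _).mp this

lemma aLoop_eq_find (s : String) : ∀ l : List String,
    aLoop s l = onFound s (l.find? (pMatch s)) s
  | [] => rfl
  | u :: rest => by
    by_cases hp : PySem.Str.endswith s u = true ∧ PySem.Str.len s > PySem.Str.len u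
    · have hb : pMatch s u = true := by
        simp only [pMatch, Bool.and_eq_true, decide_eq_true_eq]
        exact hp
      simp only [aLoop]
      rw [if_pos hp, List.find?_cons_of_pos hb]
      rfl
    · have hb : ¬ pMatch s u = true := fun ht => hp (pMatch_parts ht)
      simp only [aLoop]
      rw [if_neg hp, List.find?_cons_of_neg (by simpa using hb)]
      exact aLoop_eq_find s rest

lemma slice_toList (s : String) (k : Nat) (hk : 0 < k) :
    (PySem.Str.slice s (some (-(k : Int))) none).toList
      = s.toList.drop (s.toList.length - k) := by
  rw [PySem.Str.toList_slice, PySem.Chars.slice_eq_listSlice,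
    PySem.List.slice_from_neg_natCast _ _ hk]

lemma pMatch_iff (s u : String) (k : Nat) (hk : 0 < k) (hu : u.toList.length = k) :
    pMatch s u = true ↔
      (PySem.Str.len s > (k : Int) ∧
        PySem.Str.slice s (some (-(k : Int))) none = u) := by
  have hend : PySem.Str.endswith s u = true ↔ u.toList <:+ s.toList := by
    rw [PySem.Str.endswith_eq]; exact PySem.Chars.endswith_iff _ _
  have hulen : PySem.Str.len u = (k : Int) := by rw [PySem.Str.len_eq, hu]
  constructor
  · intro h
    obtain ⟨h1, h2⟩ := pMatch_parts h
    refine ⟨by rw [← hulen]; exact h2, ?_⟩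
    rw [← String.toList_inj, slice_toList s k hk]
    have := List.suffix_iff_eq_drop.mp (hend.mp h1)
    rw [hu] at this
    exact this.symm
  · rintro ⟨hgt, heq⟩
    have hlist : u.toList = s.toList.drop (s.toList.length - k) := by
      rw [← heq, slice_toList s k hk]
    have hsuf : u.toList <:+ s.toList := hlist ▸ List.drop_suffix _ _
    simp only [pMatch, Bool.and_eq_true, decide_eq_true_eq]
    exact ⟨hend.mpr hsuf, by rw [hulen]; exact hgt⟩

lemma bGroup (s : String) (k : Nat) (G : List String) (hk : 0 < k)
    (hlen : ∀ u ∈ G, u.toList.length = k) (cont : String) :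
    (if PySem.Str.len s > (k : Int) ∧
        PySem.Set.contains G (PySem.Str.slice s (some (-(k : Int))) none) = true then
      PySem.Str.slice s none (some (-(k : Int)))
    else cont)
    = onFound s (G.find? (pMatch s)) cont := by
  by_cases hg : PySem.Str.len s > (k : Int) ∧
      PySem.Set.contains G (PySem.Str.slice s (some (-(k : Int))) none) = true
  · rw [if_pos hg]
    have hmem : PySem.Str.slice s (some (-(k : Int))) none ∈ G := by
      have := hg.2
      simpa [PySem.Set.contains] using this
    have px : pMatch s (PySem.Str.slice s (some (-(k : Int))) none) = true :=
      (pMatch_iff s _ k hk (hlen _ hmem)).mpr ⟨hg.1, rfl⟩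
    cases hf : G.find? (pMatch s) with
    | none => exact absurd px (List.find?_eq_none.mp hf _ hmem)
    | some u =>
      have hu := (pMatch_iff s u k hk (hlen u (List.mem_of_find?_eq_some hf))).mp
        (List.find?_some hf)
      have hulen : PySem.Str.len u = (k : Int) := by
        rw [PySem.Str.len_eq, hlen u (List.mem_of_find?_eq_some hf)]
      show _ = PySem.Str.slice s none (some (-(PySem.Str.len u)))
      rw [hulen]
  · rw [if_neg hg]
    cases hf : G.find? (pMatch s) with
    | none => rfl
    | some u =>
      exfalso
      have hu := (pMatch_iff s u k hk (hlen u (List.mem_of_find?_eq_some hf))).mp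
        (List.find?_some hf)
      refine hg ⟨hu.1, ?_⟩
      rw [hu.2]
      simp [PySem.Set.contains, List.mem_of_find?_eq_some hf]

lemma find?_eq_of_same_mem {α : Type} {p : α → Bool} {l1 l2 : List α}
    (h12 : ∀ x ∈ l1, x ∈ l2) (h21 : ∀ x ∈ l2, x ∈ l1)
    (uniq : ∀ u ∈ l1, ∀ v ∈ l1, p u = true → p v = true → u = v) :
    l1.find? p = l2.find? p := by
  cases h1 : l1.find? p with
  | none =>
    cases h2 : l2.find? p with
    | none => rfl
    | some v =>
      exact absurd (List.find?_some h2)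
        (List.find?_eq_none.mp h1 v (h21 v (List.mem_of_find?_eq_some h2)))
  | some u =>
    cases h2 : l2.find? p with
    | none =>
      exact absurd (List.find?_some h1)
        (List.find?_eq_none.mp h2 u (h12 u (List.mem_of_find?_eq_some h1)))
    | some v =>
      have := uniq u (List.mem_of_find?_eq_some h1)
        v (h21 v (List.mem_of_find?_eq_some h2))
        (List.find?_some h1) (List.find?_some h2)
      rw [this]

-- ===== VERDICT (by name: the statement is the Claim_ definition above) =====
theorem base_species_py_spec : Claim_equal_base_species_py := by
  intro s _
  unfold Spec_base_species_py base_species_py base_species_py_alt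
  rw [aLoop_eq_find]
  have tbl : ∀ u ∈ aSuffixes, ∀ v ∈ aSuffixes, u.toList <:+ v.toList → u = v := by decide
  have uniq : ∀ u ∈ aSuffixes, ∀ v ∈ aSuffixes,
      pMatch s u = true → pMatch s v = true → u = v := by
    intro u hu v hv hpu hpv
    rcases le_total u.toList.length v.toList.length with h | h
    · exact tbl u hu v hv
        (List.suffix_of_suffix_length_le (pMatch_suffix hpu) (pMatch_suffix hpv) h)
    · exact (tbl v hv u hu
        (List.suffix_of_suffix_length_le (pMatch_suffix hpv) (pMatch_suffix hpu) h)).symm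
  have hfind : aSuffixes.find? (pMatch s)
      = (["therian", "defense"] ++ (["paldea", "origin", "attack"]
        ++ (["megax", "megay", "alola", "galar", "hisui", "frost", "speed", "sandy", "trash"]
        ++ (["mega", "gmax", "wash", "heat"] ++ ["fan", "mow", "sky"])))).find? (pMatch s) :=
    find?_eq_of_same_mem (by decide) (by decide) uniq
  rw [hfind]
  simp only [List.find?_append, onFound_or]
  simp only [bLoop]
  have g7 : bSuffixesByLen.getD 7 PySem.Set.empty = ["therian", "defense"] := by decide
  have g6 : bSuffixesByLen.getD 6 PySem.Set.empty = ["paldea", "origin", "attack"] := by decide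
  have g5 : bSuffixesByLen.getD 5 PySem.Set.empty
      = ["megax", "megay", "alola", "galar", "hisui", "frost", "speed", "sandy", "trash"] := by decide
  have g4 : bSuffixesByLen.getD 4 PySem.Set.empty = ["mega", "gmax", "wash", "heat"] := by decide
  have g3 : bSuffixesByLen.getD 3 PySem.Set.empty = ["fan", "mow", "sky"] := by decide
  rw [g7, g6, g5, g4, g3]
  rw [show (7 : Int) = ((7 : Nat) : Int) by norm_num,
    show (6 : Int) = ((6 : Nat) : Int) by norm_num,
    show (5 : Int) = ((5 : Nat) : Int) by norm_num,
    show (4 : Int) = ((4 : Nat) : Int) by norm_num,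
    show (3 : Int) = ((3 : Nat) : Int) by norm_num]
  rw [bGroup s 7 _ (by norm_num) (by decide),
    bGroup s 6 _ (by norm_num) (by decide),
    bGroup s 5 _ (by norm_num) (by decide),
    bGroup s 4 _ (by norm_num) (by decide),
    bGroup s 3 _ (by norm_num) (by decide)]
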